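-- pv_equiv track=rewrite | github.com/romankurnovskii/leetcode-apps | solutions/3723/01.py | maxSumOfSquares
-- ===== SOURCE A (Python) =====
-- def maxSumOfSquares(num: int, sum: int) -> str:
--     # Check if it's possible: minimum sum is num (all 1s), maximum is 9*num (all 9s)
--     if sum < num or sum > 9 * num:
--         return ""
--
--     # Greedy: to maximize sum of squares, we want to maximize individual digits
--     # Since x^2 grows faster, we want largest digits possible
--     # Strategy: fill leftmost positions with 9s, then distribute remaining
--
--     digits = []
--     remaining_sum = sum
--
--     # Fill as many 9s as possible from left to right
--     for i in range(num):
--         # Can we put a 9 here?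
--         # Remaining positions: num - i - 1
--         # Minimum needed for remaining: num - i - 1 (all 1s)
--         # Maximum we can use here: min(9, remaining_sum - (num - i - 1))
--         max_digit = min(9, remaining_sum - (num - i - 1))
--         if max_digit < 1:
--             max_digit = 1
--
--         digits.append(str(max_digit))
--         remaining_sum -= max_digit
--
--     # If there's still remaining sum, we need to distribute it
--     # But we already handled this in the loop above
--
--     return ''.join(digits)
-- ===== SOURCE B (Python) =====
-- def maxSumOfSquares(num: int, sum: int) -> str:
--     if sum < num or sum > 9 * num:
--         return ""
--     extra = sum - num
--     k = min(extra // 8, num)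
--     res = "9" * k
--     if num - k > 0:
--         res += str(extra - 8 * k + 1) + "1" * (num - k - 1)
--     return res
-- ===== Notes on version B (the rewrite author's own statement) =====
-- stated objective: simpler
-- what changed: Replaces A's per-position greedy loop (recomputing min(9, remaining - positions_left) at every index) with a closed-form digit count: k = min((sum-num)//8, num) nines, one middle digit, and ones, assembled by string repetition.
import Mathlib
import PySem

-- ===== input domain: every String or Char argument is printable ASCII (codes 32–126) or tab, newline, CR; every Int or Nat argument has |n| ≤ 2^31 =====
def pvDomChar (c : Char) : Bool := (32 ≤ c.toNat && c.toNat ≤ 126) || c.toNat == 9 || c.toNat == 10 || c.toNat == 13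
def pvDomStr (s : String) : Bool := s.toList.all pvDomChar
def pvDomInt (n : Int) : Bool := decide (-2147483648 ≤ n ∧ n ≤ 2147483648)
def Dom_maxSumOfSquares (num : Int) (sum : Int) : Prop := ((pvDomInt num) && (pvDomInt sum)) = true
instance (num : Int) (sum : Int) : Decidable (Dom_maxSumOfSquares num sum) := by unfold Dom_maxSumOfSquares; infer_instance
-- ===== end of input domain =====

-- B replaces A's per-position greedy loop by a closed-form digit count ('9'*k, one middle digit, '1'*rest); objective: simpler.

-- ===== PORT A =====
-- the for-loop of A: state is (digits, remaining_sum), iterated over range(num)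
def maxSumOfSquaresLoopA (num : Int) : List Int → List String × Int → List String × Int
  | [], st => st
  | i :: rest, (digits, remaining) =>
      let maxDigit0 := min 9 (remaining - (num - i - 1))
      let maxDigit := if maxDigit0 < 1 then 1 else maxDigit0
      maxSumOfSquaresLoopA num rest (digits ++ [PySem.Int.toStr maxDigit], remaining - maxDigit)

def maxSumOfSquares (num : Int) (sum : Int) : String :=
  if sum < num ∨ sum > 9 * num then ""
  else
    let st := maxSumOfSquaresLoopA num (PySem.List.pyRange 0 num 1) ([], sum)
    PySem.Str.join "" st.1

-- ===== PORT B =====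
-- Source B verbatim; the string concatenations are performed on the char-list level
-- (PySem.Int.toChars d = str(d); Lean's own String.append is opaque to the kernel)
def maxSumOfSquares_alt (num : Int) (sum : Int) : String :=
  if sum < num ∨ sum > 9 * num then ""
  else
    let extra := sum - num
    let k := min (PySem.Int.floordiv extra 8) num
    let nines := List.replicate k.toNat '9'
    if num - k > 0 then
      String.ofList (nines ++ PySem.Int.toChars (extra - 8 * k + 1) ++ List.replicate (num - k - 1).toNat '1')
    else
      String.ofList nines

-- ===== PRECONDITION & SPEC =====
def Spec_maxSumOfSquares (num : Int) (sum : Int) (out : String) : Prop := out = maxSumOfSquares_alt num sum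
instance (num : Int) (sum : Int) (out : String) : Decidable (Spec_maxSumOfSquares num sum out) := by unfold Spec_maxSumOfSquares; infer_instance

-- ===== CLAIM (what is proved, stated in full; the proofs are below) =====
def Claim_equal_maxSumOfSquares : Prop := ∀ (num : Int) (sum : Int), Dom_maxSumOfSquares num sum → Spec_maxSumOfSquares num sum (maxSumOfSquares num sum)

-- ===== LEMMAS AND PROOFS =====

-- closed-form description of the digit characters emitted from a state with m positions
-- left and m + extra sum remaining (0 ≤ extra ≤ 8*m)
def pvClosed (m : Nat) (extra : Int) : List Char :=
  List.replicate (min (PySem.Int.floordiv extra 8) (m : Int)).toNat '9' ++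
    (if (m : Int) - min (PySem.Int.floordiv extra 8) (m : Int) > 0 then
      PySem.Int.toChars (extra - 8 * min (PySem.Int.floordiv extra 8) (m : Int) + 1) ++
        List.replicate ((m : Int) - min (PySem.Int.floordiv extra 8) (m : Int) - 1).toNat '1'
    else [])

lemma join_nil_eq_flatten (l : List (List Char)) : PySem.Chars.join [] l = l.flatten := by
  induction l with
  | nil => rfl
  | cons a t ih =>
    cases t with
    | nil => simp [PySem.Chars.join, List.intercalate]
    | cons b t' =>
      rw [PySem.Chars.join_cons_cons]
      simp only [List.flatten_cons] at ih ⊢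
      simp [ih]

lemma pvClosed_step (m : Nat) (r : Int) (h1 : (m : Int) + 1 ≤ r) (h2 : r ≤ 9 * ((m : Int) + 1)) :
    pvClosed (m + 1) (r - ((m : Int) + 1)) =
      PySem.Int.toChars (min 9 (r - m)) ++ pvClosed m (r - min 9 (r - m) - m) := by
  have h8 : (0 : Int) < 8 := by norm_num
  by_cases hc : r - (m : Int) ≥ 9
  · -- the greedy digit is 9
    have hd : min 9 (r - (m : Int)) = 9 := by omega
    rw [hd]
    unfold pvClosed
    push_cast
    rw [PySem.Int.floordiv_eq_ediv_of_pos h8, PySem.Int.floordiv_eq_ediv_of_pos h8]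
    have hq : (r - 9 - (m : Int)) / 8 = (r - ((m : Int) + 1)) / 8 - 1 := by
      have h := Int.add_mul_ediv_right (r - ((m : Int) + 1)) (-1) (show (8:Int) ≠ 0 by norm_num)
      have he : r - ((m : Int) + 1) + (-1) * 8 = r - 9 - (m : Int) := by ring
      omega
    have hq0 : 1 ≤ (r - ((m : Int) + 1)) / 8 := by
      have h88 : (8 : Int) ≤ r - ((m : Int) + 1) := by omega
      have := Int.ediv_le_ediv h8 h88
      omega
    rw [hq]
    set q := (r - ((m : Int) + 1)) / 8 with hqdef
    have hk : min q ((m : Int) + 1) = min (q - 1) (m : Int) + 1 := by omega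
    rw [hk]
    set k := min (q - 1) (m : Int) with hkdef
    have hk0 : 0 ≤ k := by omega
    have h9 : PySem.Int.toChars 9 = ['9'] := by decide
    rw [h9]
    have hrep : (k + 1).toNat = k.toNat + 1 := by omega
    rw [hrep, List.replicate_succ]
    have ha1 : r - ((m : Int) + 1) - 8 * (k + 1) + 1 = r - 9 - (m : Int) - 8 * k + 1 := by ring
    have ha2 : (m : Int) + 1 - (k + 1) = (m : Int) - k := by ring
    rw [ha1, ha2]
    simp
  · -- the greedy digit is r - m ( = extra + 1 ≤ 8 ), afterwards all ones
    have hd : min 9 (r - (m : Int)) = r - (m : Int) := by omega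
    rw [hd]
    unfold pvClosed
    push_cast
    rw [show r - (r - (m : Int)) - (m : Int) = 0 from by ring]
    rw [PySem.Int.floordiv_eq_ediv_of_pos h8, PySem.Int.floordiv_eq_ediv_of_pos h8]
    have hq : (r - ((m : Int) + 1)) / 8 = 0 := by omega
    rw [hq, Int.zero_ediv]
    rw [min_eq_left (by omega : (0:Int) ≤ (m : Int) + 1), min_eq_left (by omega : (0:Int) ≤ (m : Int))]
    simp only [Int.toNat_zero, List.replicate_zero, List.nil_append, mul_zero, sub_zero]
    rw [if_pos (by omega : (m : Int) + 1 > 0),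
        show r - ((m : Int) + 1) + 1 = r - (m : Int) from by ring,
        show ((m : Int) + 1 - 1).toNat = m from by omega]
    by_cases hm : m = 0
    · subst hm
      norm_num
    · have hmi : (0 : Int) < (m : Int) := by exact_mod_cast Nat.pos_of_ne_zero hm
      rw [if_pos (by omega : (m : Int) > 0)]
      have h1c : PySem.Int.toChars (0 + 1) = ['1'] := by decide
      rw [h1c]
      have hrep : List.replicate m '1' = '1' :: List.replicate ((m : Int) - 1).toNat '1' := by
        obtain ⟨m', rfl⟩ : ∃ m', m = m' + 1 := ⟨m - 1, by omega⟩
        rw [show (((m' + 1 : Nat) : Int) - 1).toNat = m' from by push_cast; omega, List.replicate_succ]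
      rw [hrep]
      simp

lemma loopA_spec (num : Int) (m : Nat) (r : Int) (acc : List String)
    (h1 : (m : Int) ≤ r) (h2 : r ≤ 9 * m) :
    ((maxSumOfSquaresLoopA num (PySem.List.pyRange (num - m) num 1) (acc, r)).1.map String.toList).flatten
      = (acc.map String.toList).flatten ++ pvClosed m (r - m) := by
  induction m generalizing r acc with
  | zero =>
    rw [PySem.List.pyRange_one_eq_nil (by omega)]
    have hr : r = 0 := by push_cast at h1 h2; omega
    subst hr
    simp only [maxSumOfSquaresLoopA, Nat.cast_zero, sub_zero]
    rw [show pvClosed 0 0 = [] from by decide, List.append_nil]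
  | succ m ih =>
    rw [PySem.List.pyRange_one_cons (by push_cast; omega)]
    show ((maxSumOfSquaresLoopA num _ (acc, r)).1.map String.toList).flatten = _
    rw [maxSumOfSquaresLoopA]
    have harith : r - (num - (num - ((m : Int) + 1)) - 1) = r - (m : Int) := by ring
    simp only [Nat.cast_add, Nat.cast_one, harith]
    have hge : (1 : Int) ≤ min 9 (r - (m : Int)) := by
      have : (m : Int) + 1 ≤ r := by push_cast at h1; omega
      omega
    rw [if_neg (by omega)]
    set d := min 9 (r - (m : Int)) with hd
    rw [show num - ((m : Int) + 1) + 1 = num - (m : Int) from by ring]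
    have hb1 : (m : Int) ≤ r - d := by
      have : (m : Int) + 1 ≤ r := by push_cast at h1; omega
      omega
    have hb2 : r - d ≤ 9 * m := by
      have : r ≤ 9 * ((m : Int) + 1) := by push_cast at h2; omega
      omega
    rw [ih (r - d) (acc ++ [PySem.Int.toStr d]) hb1 hb2]
    have hcl : pvClosed (m + 1) (r - ((m : Int) + 1)) = PySem.Int.toChars d ++ pvClosed m (r - d - (m : Int)) := by
      rw [hd]
      exact pvClosed_step m r (by push_cast at h1 ⊢; omega) (by push_cast at h2 ⊢; omega)
    rw [hcl]
    simp [PySem.Int.toList_toStr]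

-- ===== VERDICT (by name: the statement is the Claim_ definition above) =====
theorem maxSumOfSquares_spec : Claim_equal_maxSumOfSquares := by
  intro num sum _
  unfold Spec_maxSumOfSquares
  apply String.toList_inj.mp
  simp only [maxSumOfSquares, maxSumOfSquares_alt]
  by_cases hbad : sum < num ∨ sum > 9 * num
  · rw [if_pos hbad, if_pos hbad]
  · rw [if_neg hbad, if_neg hbad]
    have hlo : num ≤ sum := by omega
    have hhi : sum ≤ 9 * num := by omega
    have hnum0 : 0 ≤ num := by nlinarith
    have hm : ((num.toNat : Int)) = num := Int.toNat_of_nonneg hnum0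
    have hL : (PySem.Str.join "" (maxSumOfSquaresLoopA num (PySem.List.pyRange 0 num 1) ([], sum)).1).toList
        = pvClosed num.toNat (sum - num) := by
      rw [PySem.Str.toList_join, show ("".toList : List Char) = [] from rfl, join_nil_eq_flatten,
          show PySem.List.pyRange 0 num 1 = PySem.List.pyRange (num - (num.toNat : Int)) num 1 from by rw [hm, sub_self],
          loopA_spec num num.toNat sum [] (by omega) (by rw [hm]; omega)]
      rw [hm]
      simp
    rw [hL]
    unfold pvClosed
    rw [hm]
    split_ifs with h
    · rw [String.toList_ofList, List.append_assoc]
    · rw [String.toList_ofList, List.append_nil]
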